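-- pv_equiv track=rewrite | github.com/hansmosh/git-relations | gitrelations.py | _remove_low_counts
-- ===== SOURCE A (Python) =====
-- def _remove_low_counts(relations, threshold=1):
--     temp = {
--         fromfile: {
--             tofile: count
--             for tofile, count in counts.items() if count > threshold
--         }
--         for fromfile, counts in relations.items()
--     }
--     return {tofile: counts for tofile, counts in temp.items() if counts}
-- ===== SOURCE B (Python) =====
-- def _remove_low_counts(relations, threshold=1):
--     # Flatten to a filtered stream of (fromfile, tofile, count) triples,
--     # then regroup the survivors back into a nested dict via setdefault.
--     triples = [
--         (fromfile, tofile, count)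
--         for fromfile, counts in relations.items()
--         for tofile, count in counts.items()
--         if count > threshold
--     ]
--     result = {}
--     for fromfile, tofile, count in triples:
--         result.setdefault(fromfile, {})[tofile] = count
--     return result
-- ===== Notes on version B (the rewrite author's own statement) =====
-- stated objective: alternative
-- what changed: Instead of A's dict-of-dicts pipeline (filter every inner dict, then a second scan dropping empty entries), B flattens the input into a single filtered stream of (fromfile, tofile, count) triples and regroups the survivors with setdefault, so empty groups never exist and no second scan is needed.
import Mathlib
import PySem

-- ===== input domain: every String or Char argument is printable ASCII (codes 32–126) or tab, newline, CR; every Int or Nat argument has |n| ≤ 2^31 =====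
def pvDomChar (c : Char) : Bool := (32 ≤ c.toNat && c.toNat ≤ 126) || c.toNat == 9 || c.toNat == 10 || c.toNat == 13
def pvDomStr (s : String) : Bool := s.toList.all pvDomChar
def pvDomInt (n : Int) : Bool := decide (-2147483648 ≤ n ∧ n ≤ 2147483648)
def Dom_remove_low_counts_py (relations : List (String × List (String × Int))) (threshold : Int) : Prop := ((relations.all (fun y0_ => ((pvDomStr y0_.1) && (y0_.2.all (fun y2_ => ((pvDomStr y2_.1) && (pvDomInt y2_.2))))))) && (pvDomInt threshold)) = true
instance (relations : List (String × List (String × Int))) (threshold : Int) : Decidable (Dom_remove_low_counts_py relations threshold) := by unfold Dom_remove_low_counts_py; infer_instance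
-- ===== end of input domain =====

-- B regroups the filtered flat triple stream instead of A's two-stage nested-dict pipeline; same value on dict inputs (objective: alternative).


-- ===== PORT A =====
-- A: build temp = every fromfile with its inner dict filtered by count > threshold, then a second comprehension drops empty inner dicts.
def remove_low_counts_py (relations : List (String × List (String × Int))) (threshold : Int) : List (String × List (String × Int)) :=
  let temp := relations.map (fun p => (p.1, p.2.filter (fun q => decide (threshold < q.2))))
  temp.filter (fun p => decide (p.2 ≠ []))

-- ===== PORT B =====
-- B: flatten to the filtered triple stream (the nested comprehension), then regroup with setdefault.
def rlcTriples (relations : List (String × List (String × Int))) (threshold : Int) : List (String × String × Int) :=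
  relations.flatMap (fun p => (p.2.filter (fun q => decide (threshold < q.2))).map (fun q => (p.1, q.1, q.2)))

-- one loop body: result.setdefault(fromfile, {})[tofile] = count  (hand port, exact: overwrite-in-place / append like a Python dict)
def rlcStep (d : List (String × List (String × Int))) (tr : String × String × Int) : List (String × List (String × Int)) :=
  if d.any (fun e => e.1 == tr.1) then
    d.map (fun e => if e.1 == tr.1 then
      (e.1, if e.2.any (fun q => q.1 == tr.2.1)
            then e.2.map (fun q => if q.1 == tr.2.1 then (q.1, tr.2.2) else q)
            else e.2 ++ [(tr.2.1, tr.2.2)])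
      else e)
  else d ++ [(tr.1, [(tr.2.1, tr.2.2)])]

def remove_low_counts_py_alt (relations : List (String × List (String × Int))) (threshold : Int) : List (String × List (String × Int)) :=
  (rlcTriples relations threshold).foldl rlcStep []

-- ===== PRECONDITION & SPEC =====
-- Pre_ excludes association lists with duplicate keys (outer or inner): those do not represent any
-- Python dict input — both A's and B's Python parameters are dicts, whose keys are distinct by construction.
def Pre_remove_low_counts_py (relations : List (String × List (String × Int))) (threshold : Int) : Prop :=
  (relations.map Prod.fst).Nodup ∧ ∀ p ∈ relations, (p.2.map Prod.fst).Nodup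
instance (relations : List (String × List (String × Int))) (threshold : Int) : Decidable (Pre_remove_low_counts_py relations threshold) := by unfold Pre_remove_low_counts_py; infer_instance
def pvWitness_remove_low_counts_py : (List (String × List (String × Int))) × Int :=
  ([("a", [("b", 2), ("c", 0)]), ("d", [])], 1)
def Spec_remove_low_counts_py (relations : List (String × List (String × Int))) (threshold : Int) (out : List (String × List (String × Int))) : Prop := out = remove_low_counts_py_alt relations threshold
instance (relations : List (String × List (String × Int))) (threshold : Int) (out : List (String × List (String × Int))) : Decidable (Spec_remove_low_counts_py relations threshold out) := by unfold Spec_remove_low_counts_py; infer_instance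

-- ===== CLAIM (what is proved, stated in full; the proofs are below) =====
def Claim_equal_remove_low_counts_py : Prop := ∀ (relations : List (String × List (String × Int))) (threshold : Int), Dom_remove_low_counts_py relations threshold → Pre_remove_low_counts_py relations threshold → Spec_remove_low_counts_py relations threshold (remove_low_counts_py relations threshold)

-- ===== LEMMAS AND PROOFS =====

-- acc is unchanged by mapping a key-guarded update when the key is absent from acc
theorem rlc_map_fresh (acc : List (String × List (String × Int))) (k : String)
    (g : String × List (String × Int) → String × List (String × Int))
    (hk : k ∉ acc.map Prod.fst)
    (hg : ∀ e : String × List (String × Int), e.1 ≠ k → g e = e) :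
    acc.map g = acc := by
  have : acc.map g = acc.map id := by
    apply List.map_congr_left
    intro e he
    exact hg e (fun h => hk (List.mem_map.mpr ⟨e, he, h⟩))
  simpa using this

-- folding the rest of one block onto acc ++ [(k, v)]: each new inner key is fresh, so it appends into the bucket
theorem rlc_block_rest (qs : List (String × Int)) :
    ∀ (acc : List (String × List (String × Int))) (k : String) (v : List (String × Int)),
    k ∉ acc.map Prod.fst →
    (∀ q ∈ qs, q.1 ∉ v.map Prod.fst) →
    (qs.map Prod.fst).Nodup →
    (qs.map (fun q => (k, q.1, q.2))).foldl rlcStep (acc ++ [(k, v)]) = acc ++ [(k, v ++ qs)] := by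
  induction qs with
  | nil => intro acc k v _ _ _; simp
  | cons q qs ih =>
      intro acc k v hk hfresh hnd
      simp only [List.map_cons, List.foldl_cons]
      have hstep : rlcStep (acc ++ [(k, v)]) (k, q.1, q.2) = acc ++ [(k, v ++ [q])] := by
        unfold rlcStep
        have hany : (acc ++ [(k, v)]).any (fun e => e.1 == k) = true := by
          simp
        rw [if_pos hany]
        simp only [List.map_append, List.map_cons, List.map_nil]
        rw [rlc_map_fresh acc k _ hk (by intro e he; simp [he])]
        have hq : q.1 ∉ v.map Prod.fst := hfresh q (List.mem_cons_self ..)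
        have hvany : v.any (fun p => p.1 == q.1) = false := by
          rw [List.any_eq_false]
          intro p hp h
          exact hq (List.mem_map.mpr ⟨p, hp, eq_of_beq h⟩)
        simp [hvany]
      rw [hstep]
      have hfresh' : ∀ r ∈ qs, r.1 ∉ (v ++ [q]).map Prod.fst := by
        intro r hr
        simp only [List.map_append, List.map_cons, List.map_nil, List.mem_append, List.mem_cons,
          List.not_mem_nil, or_false, not_or]
        refine ⟨hfresh r (List.mem_cons_of_mem _ hr), ?_⟩
        simp only [List.map_cons, List.nodup_cons] at hnd
        intro h
        exact hnd.1 (h ▸ List.mem_map.mpr ⟨r, hr, rfl⟩)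
      have hnd' : (qs.map Prod.fst).Nodup := by
        simp only [List.map_cons, List.nodup_cons] at hnd; exact hnd.2
      rw [ih acc k (v ++ [q]) hk hfresh' hnd']
      simp

-- one whole block: folding the triples of one fromfile k over acc appends (k, pr) iff pr is non-empty
theorem rlc_block (pr : List (String × Int)) (acc : List (String × List (String × Int))) (k : String)
    (hk : k ∉ acc.map Prod.fst) (hnd : (pr.map Prod.fst).Nodup) :
    (pr.map (fun q => (k, q.1, q.2))).foldl rlcStep acc
      = acc ++ (if pr = [] then [] else [(k, pr)]) := by
  cases pr with
  | nil => simp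
  | cons q qs =>
      simp only [List.map_cons, List.foldl_cons, if_neg (List.cons_ne_nil q qs)]
      have hstep : rlcStep acc (k, q.1, q.2) = acc ++ [(k, [q])] := by
        unfold rlcStep
        have hany : acc.any (fun e => e.1 == k) = false := by
          rw [List.any_eq_false]
          intro e he h
          exact hk (List.mem_map.mpr ⟨e, he, eq_of_beq h⟩)
        simp [hany]
      rw [hstep]
      simp only [List.map_cons, List.nodup_cons] at hnd
      have hfresh : ∀ r ∈ qs, r.1 ∉ ([q] : List (String × Int)).map Prod.fst := by
        intro r hr
        simp only [List.map_cons, List.map_nil, List.mem_cons, List.not_mem_nil, or_false]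
        intro h
        exact hnd.1 (h ▸ List.mem_map.mpr ⟨r, hr, rfl⟩)
      rw [rlc_block_rest qs acc k [q] hk hfresh hnd.2]
      simp

-- main invariant: folding all remaining blocks over acc appends A's result for the remaining relations
theorem rlc_main (relations : List (String × List (String × Int))) (threshold : Int) :
    ∀ acc : List (String × List (String × Int)),
    (∀ p ∈ relations, p.1 ∉ acc.map Prod.fst) →
    (relations.map Prod.fst).Nodup →
    (∀ p ∈ relations, (p.2.map Prod.fst).Nodup) →
    (rlcTriples relations threshold).foldl rlcStep acc
      = acc ++ remove_low_counts_py relations threshold := by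
  induction relations with
  | nil => intro acc _ _ _; simp [rlcTriples, remove_low_counts_py]
  | cons p rest ih =>
      intro acc hdisj hnd hinner
      simp only [rlcTriples, List.flatMap_cons, List.foldl_append] at *
      have hknd : ((p.2.filter (fun q => decide (threshold < q.2))).map Prod.fst).Nodup := by
        have h : List.Sublist ((p.2.filter (fun q => decide (threshold < q.2))).map Prod.fst)
            (p.2.map Prod.fst) := (List.filter_sublist).map Prod.fst
        exact h.nodup (hinner p (List.mem_cons_self ..))
      rw [rlc_block _ acc p.1 (hdisj p (List.mem_cons_self ..)) hknd]
      simp only [List.map_cons, List.nodup_cons] at hnd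
      set pr := p.2.filter (fun q => decide (threshold < q.2)) with hpr
      have hdisj' : ∀ r ∈ rest, r.1 ∉ (acc ++ (if pr = [] then [] else [(p.1, pr)])).map Prod.fst := by
        intro r hr
        simp only [List.map_append, List.mem_append, not_or]
        refine ⟨hdisj r (List.mem_cons_of_mem _ hr), ?_⟩
        intro h
        apply hnd.1
        rcases Decidable.em (pr = []) with he | he
        · simp [he] at h
        · simp only [if_neg he, List.map_cons, List.map_nil, List.mem_cons, List.not_mem_nil,
            or_false] at h
          exact h ▸ List.mem_map.mpr ⟨r, hr, rfl⟩
      rw [ih _ hdisj' hnd.2 (fun r hr => hinner r (List.mem_cons_of_mem _ hr))]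
      simp only [remove_low_counts_py, List.map_cons, List.filter_cons, List.append_assoc]
      rcases Decidable.em (pr = []) with he | he <;> simp [← hpr, he]

-- ===== VERDICT (by name: the statement is the Claim_ definition above) =====
theorem remove_low_counts_py_spec : Claim_equal_remove_low_counts_py := by
  intro relations threshold _ hpre
  unfold Spec_remove_low_counts_py remove_low_counts_py_alt
  rw [rlc_main relations threshold [] (by simp) hpre.1 hpre.2]
  simp
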